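-- pv_equiv track=rewrite | github.com/HumbertoBPF/LeetCodePython | heap/LeetCode393.py | kSmallestPairsOptimized
-- ===== SOURCE A (Python) =====
-- import heapq
-- from typing import List
--
-- def kSmallestPairsOptimized(nums1: List[int], nums2: List[int], k: int) -> List[List[int]]:
--     n = len(nums1)
--     m = len(nums2)
--
--     output = []
--     candidates_heap = []
--     visited = set()
--
--     heapq.heappush(candidates_heap, (nums1[0] + nums2[0], 0, 0))
--
--     while len(output) < k:
--         _, i, j = heapq.heappop(candidates_heap)
--         output.append([nums1[i], nums2[j]])
--         # As candidates of the lowest sum greater than the current one, we have: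
--         # - nums1[i + 1] + nums2[j]
--         # - nums1[i] + nums2[j + 1]
--         # - All other sums that we have already included to the heap
--         # We must check the bounds ot the array and track pairs that have already been added to the heap to avoid
--         # duplicates
--         if (i + 1 < n) and ((i + 1, j) not in visited):
--             heapq.heappush(candidates_heap, (nums1[i + 1] + nums2[j], i + 1, j))
--             visited.add((i + 1, j))
--
--         if (j + 1 < m) and ((i, j + 1) not in visited):
--             heapq.heappush(candidates_heap, (nums1[i] + nums2[j + 1], i, j + 1))
--             visited.add((i, j + 1))
--
--     return output
-- ===== SOURCE B (Python) =====
-- def kSmallestPairsOptimized(nums1, nums2, k):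
--     # Dijkstra-style exploration like A, but with NO heap and NO ever-pushed
--     # visited set: each round the frontier is recomputed directly from the
--     # popped cells (a cell is a candidate iff it is (0,0) or a right/up
--     # successor of a popped cell, in bounds and not itself popped), and its
--     # minimum (sum, i, j) tuple is taken by a linear scan.  popped_set mirrors
--     # the popped list exactly (same cells), only for O(1) membership tests.
--     n = len(nums1)
--     m = len(nums2)
--     popped = []
--     popped_set = set()
--     output = []
--     while len(output) < k:
--         best = None
--         for (i, j) in [(0, 0)] + [c for p in popped for c in ((p[0] + 1, p[1]), (p[0], p[1] + 1))]:
--             if i < n and j < m and (i, j) not in popped_set: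
--                 cand = (nums1[i] + nums2[j], i, j)
--                 if best is None or cand < best:
--                     best = cand
--         _, i, j = best
--         popped.append((i, j))
--         popped_set.add((i, j))
--         output.append([nums1[i], nums2[j]])
--     return output
-- ===== Notes on version B (the rewrite author's own statement) =====
-- stated objective: alternative
-- what changed: A's heapq priority queue with an ever-pushed visited set is replaced by a heap-free, visited-free Dijkstra round: each iteration the frontier is recomputed directly from the popped-cells list ((0,0) plus right/up successors of popped cells, in bounds and not popped) and its minimum (sum,i,j) tuple is found by a linear scan.
import Mathlib
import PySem

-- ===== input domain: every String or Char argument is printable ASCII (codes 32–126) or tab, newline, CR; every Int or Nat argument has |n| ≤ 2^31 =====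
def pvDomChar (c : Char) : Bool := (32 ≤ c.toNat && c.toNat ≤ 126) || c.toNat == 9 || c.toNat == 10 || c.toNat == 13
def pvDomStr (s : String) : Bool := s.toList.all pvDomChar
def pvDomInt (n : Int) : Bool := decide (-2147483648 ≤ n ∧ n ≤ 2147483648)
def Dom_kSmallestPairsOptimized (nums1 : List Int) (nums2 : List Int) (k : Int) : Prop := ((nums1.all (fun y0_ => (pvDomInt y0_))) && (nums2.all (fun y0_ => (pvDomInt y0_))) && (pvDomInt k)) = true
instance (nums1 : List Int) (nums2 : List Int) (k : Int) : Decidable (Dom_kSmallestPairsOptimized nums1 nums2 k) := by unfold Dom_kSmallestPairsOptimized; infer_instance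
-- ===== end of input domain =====

-- B replaces A's heapq-with-visited-set exploration by a heap-free, visited-free one:
-- each round the frontier is recomputed directly from the popped-cells list and its
-- minimum (sum, i, j) tuple is found by a linear scan (alternative, not claimed faster).

-- ===== PORT A =====
-- Python's `<` on int 3-tuples (lexicographic), as heapq compares A's heap entries.
def pvTLtA (a b : Int × Int × Int) : Bool :=
  a.1 < b.1 || (a.1 == b.1 && (a.2.1 < b.2.1 || (a.2.1 == b.2.1 && a.2.2 < b.2.2)))

-- Functional model of heapq on int 3-tuples: the heap is kept as an ascending list, so
-- heappush is ordered insertion and heappop takes the head.  Exact for A's use: heappop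
-- returns the least tuple of the heap's multiset, and tuples are totally ordered by pvTLtA.
def pvHPush (x : Int × Int × Int) : List (Int × Int × Int) → List (Int × Int × Int)
  | [] => [x]
  | y :: ys => if pvTLtA x y then x :: y :: ys else y :: pvHPush x ys

-- the `while len(output) < k` loop: output grows by one per iteration, so k.toNat iterations
-- remain; `none` = the Python raises (heappop from an empty heap).  All list indexing inside
-- the loop uses pyGetD: the bounds guards and the heap invariant (only in-range (i, j) are
-- ever pushed) keep every such index in range, so pyGetD is exact here.
def pvLoopA (nums1 nums2 : List Int) (n m : Int) :
    Nat → List (List Int) → List (Int × Int × Int) → PySem.Set (Int × Int) →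
    Option (List (List Int))
  | 0, out, _, _ => some out
  | fuel + 1, out, heap, visited =>
    match heap with
    | [] => none
    | (_, i, j) :: rest =>
      let out' := out ++ [[PySem.List.pyGetD nums1 i 0, PySem.List.pyGetD nums2 j 0]]
      let g1 := decide (i + 1 < n) && !(PySem.Set.contains visited (i + 1, j))
      let heap1 := if g1 then pvHPush (PySem.List.pyGetD nums1 (i + 1) 0 + PySem.List.pyGetD nums2 j 0, i + 1, j) rest else rest
      let vis1 := if g1 then PySem.Set.add visited (i + 1, j) else visited
      let g2 := decide (j + 1 < m) && !(PySem.Set.contains vis1 (i, j + 1))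
      let heap2 := if g2 then pvHPush (PySem.List.pyGetD nums1 i 0 + PySem.List.pyGetD nums2 (j + 1) 0, i, j + 1) heap1 else heap1
      let vis2 := if g2 then PySem.Set.add vis1 (i, j + 1) else vis1
      pvLoopA nums1 nums2 n m fuel out' heap2 vis2

def kSmallestPairsOptimized (nums1 : List Int) (nums2 : List Int) (k : Int) : List (List Int) :=
  let n : Int := nums1.length
  let m : Int := nums2.length
  match PySem.List.pyGet? nums1 0, PySem.List.pyGet? nums2 0 with
  | some a, some b =>
    (pvLoopA nums1 nums2 n m k.toNat [] (pvHPush (a + b, 0, 0) []) PySem.Set.empty).getD []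
  | _, _ => []  -- nums1[0] / nums2[0]: IndexError on an empty array (outside Pre_)

-- ===== PORT B =====
-- `[(0, 0)] + [c for p in popped for c in ((p[0]+1, p[1]), (p[0], p[1]+1))]`
def pvCandsB (popped : List (Int × Int)) : List (Int × Int) :=
  (0, 0) :: popped.flatMap (fun p => [(p.1 + 1, p.2), (p.1, p.2 + 1)])

-- `cand < best` is Python's lexicographic `<` on int 3-tuples, i.e. pvTLtA (shared helper);
-- the `for (i, j) in …: if …: cand = …; if best is None or cand < best: best = cand` scan;
-- nums1[i] / nums2[j] via pyGetD: the guards i < n, j < m plus candidates being (0,0) or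
-- successors of previously chosen in-range cells keep both indices in range, so it is exact.
-- `(i, j) not in popped_set` is ported as membership in the popped list: popped_set holds
-- exactly the popped list's cells, so the two tests agree on every input.
def pvBestB (nums1 nums2 : List Int) (n m : Int) (popped : List (Int × Int)) :
    Option (Int × Int × Int) :=
  (pvCandsB popped).foldl
    (fun best c =>
      if decide (c.1 < n) && decide (c.2 < m) && !(decide (c ∈ popped)) then
        let cand := (PySem.List.pyGetD nums1 c.1 0 + PySem.List.pyGetD nums2 c.2 0, c.1, c.2)
        match best with
        | none => some cand
        | some b => if pvTLtA cand b then some cand else some b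
      else best)
    none

-- the `while len(output) < k` loop; `none` = the Python raises (`_, i, j = None` TypeError).
def pvLoopB (nums1 nums2 : List Int) (n m : Int) :
    Nat → List (List Int) → List (Int × Int) → Option (List (List Int))
  | 0, out, _ => some out
  | fuel + 1, out, popped =>
    match pvBestB nums1 nums2 n m popped with
    | none => none
    | some t =>
      pvLoopB nums1 nums2 n m fuel
        (out ++ [[PySem.List.pyGetD nums1 t.2.1 0, PySem.List.pyGetD nums2 t.2.2 0]])
        (popped ++ [(t.2.1, t.2.2)])

def kSmallestPairsOptimized_alt (nums1 : List Int) (nums2 : List Int) (k : Int) : List (List Int) :=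
  (pvLoopB nums1 nums2 nums1.length nums2.length k.toNat [] []).getD []

-- ===== PRECONDITION & SPEC =====
-- Pre_ = exactly where the Python A returns: both arrays non-empty (A indexes nums1[0], nums2[0]
-- unconditionally) and k ≤ len(nums1)*len(nums2) (otherwise the heap empties and heappop raises).
def Pre_kSmallestPairsOptimized (nums1 : List Int) (nums2 : List Int) (k : Int) : Prop :=
  nums1 ≠ [] ∧ nums2 ≠ [] ∧ k ≤ (nums1.length : Int) * (nums2.length : Int)
instance (nums1 : List Int) (nums2 : List Int) (k : Int) : Decidable (Pre_kSmallestPairsOptimized nums1 nums2 k) := by unfold Pre_kSmallestPairsOptimized; infer_instance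

def pvWitness_kSmallestPairsOptimized : List Int × List Int × Int := ([1, 7], [2], 2)

def Spec_kSmallestPairsOptimized (nums1 : List Int) (nums2 : List Int) (k : Int) (out : List (List Int)) : Prop := out = kSmallestPairsOptimized_alt nums1 nums2 k
instance (nums1 : List Int) (nums2 : List Int) (k : Int) (out : List (List Int)) : Decidable (Spec_kSmallestPairsOptimized nums1 nums2 k out) := by unfold Spec_kSmallestPairsOptimized; infer_instance

-- ===== CLAIM (what is proved, stated in full; the proofs are below) =====
def Claim_equal_kSmallestPairsOptimized : Prop := ∀ (nums1 : List Int) (nums2 : List Int) (k : Int), Dom_kSmallestPairsOptimized nums1 nums2 k → Pre_kSmallestPairsOptimized nums1 nums2 k → Spec_kSmallestPairsOptimized nums1 nums2 k (kSmallestPairsOptimized nums1 nums2 k)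

-- ===== LEMMAS AND PROOFS =====

-- cell in bounds
def pvInB (n m : Int) (c : Int × Int) : Prop :=
  0 ≤ c.1 ∧ c.1 < n ∧ 0 ≤ c.2 ∧ c.2 < m

-- the candidate tuple B builds for a cell
def pvMk (nums1 nums2 : List Int) (c : Int × Int) : Int × Int × Int :=
  (PySem.List.pyGetD nums1 c.1 0 + PySem.List.pyGetD nums2 c.2 0, c.1, c.2)

-- B's filter guard
def pvPass (n m : Int) (popped : List (Int × Int)) (c : Int × Int) : Bool :=
  decide (c.1 < n) && decide (c.2 < m) && !(decide (c ∈ popped))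

-- B's fold step, named so the fold lemmas can speak about it
def pvF (nums1 nums2 : List Int) (n m : Int) (popped : List (Int × Int))
    (best : Option (Int × Int × Int)) (c : Int × Int) : Option (Int × Int × Int) :=
  if pvPass n m popped c then
    match best with
    | none => some (pvMk nums1 nums2 c)
    | some b => if pvTLtA (pvMk nums1 nums2 c) b then some (pvMk nums1 nums2 c) else some b
  else best

lemma pvBestB_eq (nums1 nums2 : List Int) (n m : Int) (popped : List (Int × Int)) :
    pvBestB nums1 nums2 n m popped = (pvCandsB popped).foldl (pvF nums1 nums2 n m popped) none := rfl

-- the relation the two loops preserve between A's (heap, visited) and B's popped list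
def pvRel (nums1 nums2 : List Int) (heap : List (Int × Int × Int)) (visited : List (Int × Int))
    (popped : List (Int × Int)) : Prop :=
  heap.Pairwise (fun a b => pvTLtA a b = true) ∧
  (∀ t ∈ heap, pvInB nums1.length nums2.length t.2 ∧ t = pvMk nums1 nums2 t.2) ∧
  (∀ c : Int × Int, (c ∈ visited ∨ c = (0, 0)) ↔ (c ∈ heap.map (·.2) ∨ c ∈ popped)) ∧
  (∀ c : Int × Int, (c ∈ visited ∨ c = (0, 0)) ↔
      (c = (0, 0) ∨ (pvInB nums1.length nums2.length c ∧
        ((c.1 - 1, c.2) ∈ popped ∨ (c.1, c.2 - 1) ∈ popped)))) ∧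
  (∀ t ∈ heap, t.2 ∉ popped) ∧
  (heap.map (·.2)).Nodup ∧
  (∀ p ∈ popped, pvInB nums1.length nums2.length p)

lemma pvTLtA_iff (a b : Int × Int × Int) :
    pvTLtA a b = true ↔ (a.1 < b.1 ∨ (a.1 = b.1 ∧ (a.2.1 < b.2.1 ∨ (a.2.1 = b.2.1 ∧ a.2.2 < b.2.2)))) := by
  simp [pvTLtA]

lemma pvTLtA_irrefl (a : Int × Int × Int) : pvTLtA a a = false := by
  obtain ⟨a1, a2, a3⟩ := a; simp [pvTLtA]

lemma pvTLtA_trans {a b c : Int × Int × Int} (h1 : pvTLtA a b = true) (h2 : pvTLtA b c = true) :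
    pvTLtA a c = true := by
  obtain ⟨a1, a2, a3⟩ := a; obtain ⟨b1, b2, b3⟩ := b; obtain ⟨c1, c2, c3⟩ := c
  rw [pvTLtA_iff] at *; simp at *; omega

lemma pvTLtA_of_not_of_lt {a b c : Int × Int × Int} (h1 : pvTLtA b a = false) (h2 : pvTLtA b c = true) :
    pvTLtA a c = true := by
  obtain ⟨a1, a2, a3⟩ := a; obtain ⟨b1, b2, b3⟩ := b; obtain ⟨c1, c2, c3⟩ := c
  rw [pvTLtA_iff] at *
  rw [← Bool.not_eq_true, pvTLtA_iff] at h1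
  simp at *; omega

lemma pvTLtA_of_ne_of_not {a b : Int × Int × Int} (hne : a ≠ b) (h : pvTLtA a b = false) :
    pvTLtA b a = true := by
  obtain ⟨a1, a2, a3⟩ := a; obtain ⟨b1, b2, b3⟩ := b
  rw [pvTLtA_iff]
  rw [← Bool.not_eq_true, pvTLtA_iff] at h
  simp at *; omega

lemma pvHPush_perm (x : Int × Int × Int) (l : List (Int × Int × Int)) :
    (pvHPush x l).Perm (x :: l) := by
  induction l with
  | nil => simp [pvHPush]
  | cons y ys ih =>
    rw [pvHPush]
    split
    · exact List.Perm.refl _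
    · exact (ih.cons y).trans (List.Perm.swap x y ys)

lemma pvHPush_pairwise {x : Int × Int × Int} {l : List (Int × Int × Int)}
    (hl : l.Pairwise (fun a b => pvTLtA a b = true)) (hne : ∀ y ∈ l, x ≠ y) :
    (pvHPush x l).Pairwise (fun a b => pvTLtA a b = true) := by
  induction l with
  | nil => simp [pvHPush]
  | cons y ys ih =>
    rw [pvHPush]
    rcases List.pairwise_cons.1 hl with ⟨hy, hys⟩
    split
    · rename_i hxy
      refine List.pairwise_cons.2 ⟨?_, hl⟩
      intro z hz
      rcases List.mem_cons.1 hz with rfl | hz'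
      · exact hxy
      · exact pvTLtA_trans hxy (hy z hz')
    · rename_i hxy
      have hxy' : pvTLtA x y = false := by simpa using hxy
      have hyx : pvTLtA y x = true :=
        pvTLtA_of_ne_of_not (fun h => (hne y (by simp) h)) hxy'
      refine List.pairwise_cons.2 ⟨?_, ih hys (fun z hz => hne z (by simp [hz]))⟩
      intro z hz
      rcases List.mem_cons.1 (((pvHPush_perm x ys).mem_iff).1 hz) with h | h
      · rw [h]; exact hyx
      · exact hy z h

-- fold lemma, accumulator already some b0
lemma pvF_fold_some (nums1 nums2 : List Int) (n m : Int) (popped : List (Int × Int))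
    (l : List (Int × Int)) (b0 : Int × Int × Int) :
    ∃ t, l.foldl (pvF nums1 nums2 n m popped) (some b0) = some t ∧
      (t = b0 ∨ ∃ c ∈ l, pvPass n m popped c = true ∧ t = pvMk nums1 nums2 c) ∧
      pvTLtA b0 t = false ∧
      ∀ c ∈ l, pvPass n m popped c = true → pvTLtA (pvMk nums1 nums2 c) t = false := by
  induction l generalizing b0 with
  | nil => exact ⟨b0, rfl, Or.inl rfl, pvTLtA_irrefl b0, by simp⟩
  | cons c cs ih =>
    by_cases hp : pvPass n m popped c = true
    · have hstep : (c :: cs).foldl (pvF nums1 nums2 n m popped) (some b0) =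
          cs.foldl (pvF nums1 nums2 n m popped)
            (if pvTLtA (pvMk nums1 nums2 c) b0 then some (pvMk nums1 nums2 c) else some b0) := by
        simp [pvF, hp]
      by_cases hlt : pvTLtA (pvMk nums1 nums2 c) b0 = true
      · rw [hstep, if_pos hlt]
        obtain ⟨t, ht, hmem, hb1, hall⟩ := ih (pvMk nums1 nums2 c)
        refine ⟨t, ht, ?_, ?_, ?_⟩
        · rcases hmem with rfl | ⟨c', hc', hpc', ht'⟩
          · exact Or.inr ⟨c, by simp, hp, rfl⟩
          · exact Or.inr ⟨c', by simp [hc'], hpc', ht'⟩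
        · by_contra h
          rw [Bool.not_eq_false] at h
          have := pvTLtA_trans hlt h
          rw [hb1] at this; exact Bool.false_ne_true this
        · intro c' hc' hpc'
          rcases List.mem_cons.1 hc' with rfl | hc''
          · exact hb1
          · exact hall c' hc'' hpc'
      · have hlt' : pvTLtA (pvMk nums1 nums2 c) b0 = false := by simpa using hlt
        rw [hstep, if_neg (by simp [hlt'])]
        obtain ⟨t, ht, hmem, hb1, hall⟩ := ih b0
        refine ⟨t, ht, ?_, hb1, ?_⟩
        · rcases hmem with rfl | ⟨c', hc', hpc', ht'⟩
          · exact Or.inl rfl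
          · exact Or.inr ⟨c', by simp [hc'], hpc', ht'⟩
        · intro c' hc' hpc'
          rcases List.mem_cons.1 hc' with rfl | hc''
          · by_contra h
            rw [Bool.not_eq_false] at h
            have := pvTLtA_of_not_of_lt hlt' h
            rw [hb1] at this; exact Bool.false_ne_true this
          · exact hall c' hc'' hpc'
    · have hp' : pvPass n m popped c = false := by simpa using hp
      have hstep : (c :: cs).foldl (pvF nums1 nums2 n m popped) (some b0) =
          cs.foldl (pvF nums1 nums2 n m popped) (some b0) := by
        simp [pvF, hp']
      rw [hstep]
      obtain ⟨t, ht, hmem, hb1, hall⟩ := ih b0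
      refine ⟨t, ht, ?_, hb1, ?_⟩
      · rcases hmem with rfl | ⟨c', hc', hpc', ht'⟩
        · exact Or.inl rfl
        · exact Or.inr ⟨c', by simp [hc'], hpc', ht'⟩
      · intro c' hc' hpc'
        rcases List.mem_cons.1 hc' with rfl | hc''
        · rw [hp'] at hpc'; exact absurd hpc' (by simp)
        · exact hall c' hc'' hpc'

-- fold lemma from the none accumulator
lemma pvF_fold_none (nums1 nums2 : List Int) (n m : Int) (popped : List (Int × Int))
    (l : List (Int × Int)) :
    (l.foldl (pvF nums1 nums2 n m popped) none = none ∧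
      ∀ c ∈ l, pvPass n m popped c = false) ∨
    (∃ t, l.foldl (pvF nums1 nums2 n m popped) none = some t ∧
      (∃ c ∈ l, pvPass n m popped c = true ∧ t = pvMk nums1 nums2 c) ∧
      ∀ c ∈ l, pvPass n m popped c = true → pvTLtA (pvMk nums1 nums2 c) t = false) := by
  induction l with
  | nil => exact Or.inl ⟨rfl, by simp⟩
  | cons c cs ih =>
    by_cases hp : pvPass n m popped c = true
    · right
      have hstep : (c :: cs).foldl (pvF nums1 nums2 n m popped) none =
          cs.foldl (pvF nums1 nums2 n m popped) (some (pvMk nums1 nums2 c)) := by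
        simp [pvF, hp]
      obtain ⟨t, ht, hmem, hb1, hall⟩ := pvF_fold_some nums1 nums2 n m popped cs (pvMk nums1 nums2 c)
      refine ⟨t, by rw [hstep]; exact ht, ?_, ?_⟩
      · rcases hmem with rfl | ⟨c', hc', hpc', ht'⟩
        · exact ⟨c, by simp, hp, rfl⟩
        · exact ⟨c', by simp [hc'], hpc', ht'⟩
      · intro c' hc' hpc'
        rcases List.mem_cons.1 hc' with rfl | hc''
        · exact hb1
        · exact hall c' hc'' hpc'
    · have hp' : pvPass n m popped c = false := by simpa using hp
      have hstep : (c :: cs).foldl (pvF nums1 nums2 n m popped) none =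
          cs.foldl (pvF nums1 nums2 n m popped) none := by
        simp [pvF, hp']
      rw [hstep]
      rcases ih with ⟨h1, h2⟩ | ⟨t, ht, ⟨c', hc', hpc', ht'⟩, hall⟩
      · left
        refine ⟨h1, ?_⟩
        intro c' hc'
        rcases List.mem_cons.1 hc' with rfl | hc''
        · exact hp'
        · exact h2 c' hc''
      · right
        refine ⟨t, ht, ⟨c', by simp [hc'], hpc', ht'⟩, ?_⟩
        intro c'' hc'' hpc''
        rcases List.mem_cons.1 hc'' with rfl | h
        · rw [hp'] at hpc''; exact absurd hpc'' (by simp)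
        · exact hall c'' h hpc''

-- membership in B's candidate list
lemma mem_pvCandsB (popped : List (Int × Int)) (c : Int × Int) :
    c ∈ pvCandsB popped ↔
      (c = (0, 0) ∨ ∃ p ∈ popped, c = (p.1 + 1, p.2) ∨ c = (p.1, p.2 + 1)) := by
  simp [pvCandsB, List.mem_flatMap]

-- a candidate passes B's guard and is in the candidate list iff it is a heap cell
lemma pvCand_iff_heapcell {nums1 nums2 : List Int} {heap : List (Int × Int × Int)}
    {visited popped : List (Int × Int)}
    (hrel : pvRel nums1 nums2 heap visited popped) (c : Int × Int) :
    (c ∈ pvCandsB popped ∧ pvPass nums1.length nums2.length popped c = true) ↔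
      c ∈ heap.map (·.2) := by
  obtain ⟨h1, h2, h3, h4, h5, h6, h7⟩ := hrel
  constructor
  · rintro ⟨hc, hp⟩
    have hp' : (c.1 < (nums1.length : Int) ∧ c.2 < (nums2.length : Int)) ∧ c ∉ popped := by
      simpa [pvPass] using hp
    have hvis : c ∈ visited ∨ c = (0, 0) := by
      apply (h4 c).2
      rcases (mem_pvCandsB popped c).1 hc with rfl | ⟨p, hpm, rfl | rfl⟩
      · exact Or.inl rfl
      · obtain ⟨hp1, _, hp3, _⟩ := h7 p hpm
        exact Or.inr ⟨⟨by omega, hp'.1.1, hp3, hp'.1.2⟩, Or.inl (by simpa using hpm)⟩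
      · obtain ⟨hp1, _, hp3, _⟩ := h7 p hpm
        exact Or.inr ⟨⟨hp1, hp'.1.1, by omega, hp'.1.2⟩, Or.inr (by simpa using hpm)⟩
    rcases (h3 c).1 hvis with h | h
    · exact h
    · exact absurd h hp'.2
  · intro hc
    obtain ⟨t, htm, ht2⟩ := List.mem_map.1 hc
    obtain ⟨⟨hb1, hb2, hb3, hb4⟩, _⟩ := h2 t htm
    have hnp : c ∉ popped := ht2 ▸ h5 t htm
    refine ⟨?_, by simp [pvPass, ht2 ▸ hb2, ht2 ▸ hb4, hnp]⟩
    have hvis : c ∈ visited ∨ c = (0, 0) := (h3 c).2 (Or.inl hc)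
    rcases (h4 c).1 hvis with rfl | ⟨_, hpred⟩
    · exact (mem_pvCandsB _ _).2 (Or.inl rfl)
    · apply (mem_pvCandsB _ _).2
      rcases hpred with h | h
      · exact Or.inr ⟨(c.1 - 1, c.2), h, Or.inl (by simp)⟩
      · exact Or.inr ⟨(c.1, c.2 - 1), h, Or.inr (by simp)⟩

-- from a related state, B's linear-scan minimum is exactly A's heap head
lemma pvBestB_head {nums1 nums2 : List Int} {hd : Int × Int × Int}
    {rest : List (Int × Int × Int)} {visited popped : List (Int × Int)}
    (hrel : pvRel nums1 nums2 (hd :: rest) visited popped) :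
    pvBestB nums1 nums2 nums1.length nums2.length popped = some hd := by
  obtain ⟨h1, h2, h3, h4, h5, h6, h7⟩ := hrel
  rw [pvBestB_eq]
  rcases pvF_fold_none nums1 nums2 nums1.length nums2.length popped (pvCandsB popped) with
    ⟨_, hnone⟩ | ⟨t, ht, ⟨c, hcm, hcp, hteq⟩, hall⟩
  · exfalso
    have := (pvCand_iff_heapcell ⟨h1, h2, h3, h4, h5, h6, h7⟩ hd.2).2
      (List.mem_map.2 ⟨hd, by simp, rfl⟩)
    rw [hnone hd.2 this.1] at this
    exact absurd this.2 (by simp)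
  · rw [ht]
    congr 1
    have hcheap : c ∈ (hd :: rest).map (·.2) :=
      (pvCand_iff_heapcell ⟨h1, h2, h3, h4, h5, h6, h7⟩ c).1 ⟨hcm, hcp⟩
    obtain ⟨u, hum, hu2⟩ := List.mem_map.1 hcheap
    have hut : u = t := by
      rw [hteq, ← hu2]; exact (h2 u hum).2
    have hdc := (pvCand_iff_heapcell ⟨h1, h2, h3, h4, h5, h6, h7⟩ hd.2).2
      (List.mem_map.2 ⟨hd, by simp, rfl⟩)
    have hdmk : pvMk nums1 nums2 hd.2 = hd := ((h2 hd (by simp)).2).symm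
    have hmin : pvTLtA hd t = false := by
      have := hall hd.2 hdc.1 hdc.2
      rwa [hdmk] at this
    rcases List.mem_cons.1 hum with rfl | hur
    · exact hut.symm
    · exfalso
      have hlt : pvTLtA hd u = true := (List.pairwise_cons.1 h1).1 u hur
      rw [hut, hmin] at hlt
      exact Bool.false_ne_true hlt

-- one loop iteration preserves the relation (stated over opaque names for the
-- intermediate states so the proof does not unfold them)
set_option maxHeartbeats 1000000 in
lemma pvStepRel (nums1 nums2 : List Int) (s i j : Int) (rest : List (Int × Int × Int))
    (visited popped : List (Int × Int)) (b1 b2 : Bool) (v1 v2 : List (Int × Int))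
    (hp1 hp2 : List (Int × Int × Int))
    (hrel : pvRel nums1 nums2 ((s, i, j) :: rest) visited popped)
    (hb1def : b1 = (decide (i + 1 < (nums1.length : Int)) && !(PySem.Set.contains visited (i + 1, j))))
    (hv1def : v1 = if b1 = true then PySem.Set.add visited (i + 1, j) else visited)
    (hp1def : hp1 = if b1 = true then pvHPush (pvMk nums1 nums2 (i + 1, j)) rest else rest)
    (hb2def : b2 = (decide (j + 1 < (nums2.length : Int)) && !(PySem.Set.contains v1 (i, j + 1))))
    (hv2def : v2 = if b2 = true then PySem.Set.add v1 (i, j + 1) else v1)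
    (hp2def : hp2 = if b2 = true then pvHPush (pvMk nums1 nums2 (i, j + 1)) hp1 else hp1) :
    pvRel nums1 nums2 hp2 v2 (popped ++ [((i, j) : Int × Int)]) := by
  obtain ⟨h1, h2, h3, h4, h5, h6, h7⟩ := hrel
  obtain ⟨⟨hi0, hin, hj0, hjm⟩, hmk⟩ := h2 (s, i, j) (by simp)
  replace hi0 : (0 : Int) ≤ i := hi0
  replace hin : i < (nums1.length : Int) := hin
  replace hj0 : (0 : Int) ≤ j := hj0
  replace hjm : j < (nums2.length : Int) := hjm
  have hmapc : (((s, i, j) :: rest).map (·.2)) = (i, j) :: rest.map (·.2) := rfl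
  rw [hmapc] at h6
  have hcont : ∀ (v : List (Int × Int)) (c : Int × Int),
      PySem.Set.contains v c = decide (c ∈ v) := by
    intro v c; simp [PySem.Set.contains]
  -- names for the new states
  obtain ⟨hijr, h6r⟩ := List.nodup_cons.1 h6
  have hijp : (i, j) ∉ popped := h5 (s, i, j) (by simp)
  -- membership helpers
  have hpm : ∀ c : Int × Int, c ∈ popped ++ [((i, j) : Int × Int)] ↔ (c ∈ popped ∨ c = (i, j)) := by
    intro c; simp
  have hvisSub : ∀ c : Int × Int, c ∈ visited ∨ c = (0, 0) → c ∈ ((i,j) :: rest.map (·.2)) ∨ c ∈ popped := by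
    intro c hc
    have := (h3 c).1 hc
    rwa [hmapc] at this
  -- the two pushed cells
  have hne12 : ((i + 1, j) : Int × Int) ≠ (i, j + 1) := by
    intro h; rw [Prod.mk.injEq] at h; omega
  have hne1ij : ((i + 1, j) : Int × Int) ≠ (i, j) := by
    intro h; rw [Prod.mk.injEq] at h; omega
  have hne2ij : ((i, j + 1) : Int × Int) ≠ (i, j) := by
    intro h; rw [Prod.mk.injEq] at h; omega
  have hno1 : ((i + 1, j) : Int × Int) ≠ (0, 0) := by
    intro h; rw [Prod.mk.injEq] at h; omega
  have hno2 : ((i, j + 1) : Int × Int) ≠ (0, 0) := by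
    intro h; rw [Prod.mk.injEq] at h; omega
  -- guard booleans as propositions
  have hcont : ∀ (v : List (Int × Int)) (c : Int × Int),
      PySem.Set.contains v c = decide (c ∈ v) := by
    intro v c; simp [PySem.Set.contains]
  have h1r : rest.Pairwise (fun a b => pvTLtA a b = true) := (List.pairwise_cons.1 h1).2
  have hb1iff : b1 = true ↔ ((i + 1 < (nums1.length : Int)) ∧ (i + 1, j) ∉ visited) := by
    simp [hb1def, hcont]
  have hv1mem : ∀ d : Int × Int, d ∈ v1 ↔ (d ∈ visited ∨ (b1 = true ∧ d = (i + 1, j))) := by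
    intro d
    by_cases hb : b1 = true
    · have hnv : ((i + 1, j) : Int × Int) ∉ visited := (hb1iff.1 hb).2
      simp [hv1def, hb, PySem.Set.add, PySem.Set.contains, hnv]
    · simp [hv1def, hb]
  have hb2iff : b2 = true ↔ ((j + 1 < (nums2.length : Int)) ∧ (i, j + 1) ∉ visited) := by
    have : (((i, j + 1) : Int × Int) ∈ v1) ↔ ((i, j + 1) : Int × Int) ∈ visited := by
      rw [hv1mem]
      constructor
      · rintro (h | ⟨_, h⟩)
        · exact h
        · exact absurd h.symm hne12
      · exact Or.inl
    simp [hb2def, hcont, this]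
  have hv2mem : ∀ d : Int × Int, d ∈ v2 ↔
      (d ∈ visited ∨ (b1 = true ∧ d = (i + 1, j)) ∨ (b2 = true ∧ d = (i, j + 1))) := by
    intro d
    by_cases hb : b2 = true
    · have hnv : ((i, j + 1) : Int × Int) ∉ v1 := by
        rw [hv1mem]
        rintro (h | ⟨_, h⟩)
        · exact (hb2iff.1 hb).2 h
        · exact hne12 h.symm
      simp only [hv2def, hb, if_pos]
      simp [PySem.Set.add, PySem.Set.contains, hnv, hv1mem d]
      tauto
    · rw [hv2def, if_neg hb, hv1mem d]
      simp [hb]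
  have hp1mem : ∀ t : Int × Int × Int, t ∈ hp1 ↔ (t ∈ rest ∨ (b1 = true ∧ t = pvMk nums1 nums2 (i + 1, j))) := by
    intro t
    by_cases hb : b1 = true
    · rw [hp1def, if_pos hb, (pvHPush_perm _ _).mem_iff, List.mem_cons]
      tauto
    · rw [hp1def, if_neg hb]
      tauto
  have hp2mem : ∀ t : Int × Int × Int, t ∈ hp2 ↔
      (t ∈ rest ∨ (b1 = true ∧ t = pvMk nums1 nums2 (i + 1, j)) ∨ (b2 = true ∧ t = pvMk nums1 nums2 (i, j + 1))) := by
    intro t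
    by_cases hb : b2 = true
    · rw [hp2def, if_pos hb, (pvHPush_perm _ _).mem_iff, List.mem_cons, hp1mem t]
      tauto
    · rw [hp2def, if_neg hb, hp1mem t]
      tauto
  have hmk1snd : (pvMk nums1 nums2 (i + 1, j)).2 = ((i + 1, j) : Int × Int) := rfl
  have hmk2snd : (pvMk nums1 nums2 (i, j + 1)).2 = ((i, j + 1) : Int × Int) := rfl
  have hcells2 : ∀ d : Int × Int, d ∈ hp2.map (·.2) ↔
      (d ∈ rest.map (·.2) ∨ (b1 = true ∧ d = (i + 1, j)) ∨ (b2 = true ∧ d = (i, j + 1))) := by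
    intro d
    simp only [List.mem_map]
    constructor
    · rintro ⟨t, ht, rfl⟩
      rcases (hp2mem t).1 ht with h | ⟨hb, rfl⟩ | ⟨hb, rfl⟩
      · exact Or.inl ⟨t, h, rfl⟩
      · exact Or.inr (Or.inl ⟨hb, rfl⟩)
      · exact Or.inr (Or.inr ⟨hb, rfl⟩)
    · rintro (⟨t, ht, rfl⟩ | ⟨hb, rfl⟩ | ⟨hb, rfl⟩)
      · exact ⟨t, (hp2mem t).2 (Or.inl ht), rfl⟩
      · exact ⟨pvMk nums1 nums2 (i + 1, j), (hp2mem _).2 (Or.inr (Or.inl ⟨hb, rfl⟩)), rfl⟩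
      · exact ⟨pvMk nums1 nums2 (i, j + 1), (hp2mem _).2 (Or.inr (Or.inr ⟨hb, rfl⟩)), rfl⟩
  -- visited cells are in bounds
  have hvis_inB : ∀ c : Int × Int, c ∈ visited → pvInB nums1.length nums2.length c := by
    intro c hc
    rcases hvisSub c (Or.inl hc) with h | h
    · rcases List.mem_cons.1 h with rfl | h'
      · exact ⟨hi0, hin, hj0, hjm⟩
      · obtain ⟨t, ht, rfl⟩ := List.mem_map.1 h'
        exact (h2 t (List.mem_cons_of_mem _ ht)).1
    · exact h7 c h
  -- freshly pushed cells are genuinely new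
  have hx1new : b1 = true → ((i + 1, j) : Int × Int) ∉ rest.map (·.2) ∧ ((i + 1, j) : Int × Int) ∉ popped := by
    intro hb
    have hnv := (hb1iff.1 hb).2
    constructor
    · intro h
      rcases (h3 (i + 1, j)).2 (Or.inl (by rw [hmapc]; exact List.mem_cons_of_mem _ h)) with h' | h'
      · exact hnv h'
      · exact hno1 h'
    · intro h
      rcases (h3 (i + 1, j)).2 (Or.inr h) with h' | h'
      · exact hnv h'
      · exact hno1 h'
  have hx2new : b2 = true → ((i, j + 1) : Int × Int) ∉ rest.map (·.2) ∧ ((i, j + 1) : Int × Int) ∉ popped := by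
    intro hb
    have hnv := (hb2iff.1 hb).2
    constructor
    · intro h
      rcases (h3 (i, j + 1)).2 (Or.inl (by rw [hmapc]; exact List.mem_cons_of_mem _ h)) with h' | h'
      · exact hnv h'
      · exact hno2 h'
    · intro h
      rcases (h3 (i, j + 1)).2 (Or.inr h) with h' | h'
      · exact hnv h'
      · exact hno2 h'
  -- component 1: the heap stays sorted
  have hpw1 : hp1.Pairwise (fun a b => pvTLtA a b = true) := by
    by_cases hb : b1 = true
    · simp only [hp1def, hb, if_pos]
      refine pvHPush_pairwise h1r ?_
      intro y hy hxy
      exact (hx1new hb).1 (List.mem_map.2 ⟨y, hy, congrArg Prod.snd hxy.symm⟩)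
    · simp [hp1def, hb, h1r]
  have hpw2 : hp2.Pairwise (fun a b => pvTLtA a b = true) := by
    by_cases hb : b2 = true
    · simp only [hp2def, hb, if_pos]
      refine pvHPush_pairwise hpw1 ?_
      intro y hy hxy
      rcases (hp1mem y).1 hy with h | ⟨hb1', rfl⟩
      · exact (hx2new hb).1 (List.mem_map.2 ⟨y, h, congrArg Prod.snd hxy.symm⟩)
      · exact hne12 (by have := congrArg (·.2) hxy; simpa [hmk1snd, hmk2snd] using this.symm)
    · simp only [hp2def, hb, if_neg hb]
      exact hpw1
  -- component 2: heap entries are in bounds and canonical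
  have hent : ∀ t ∈ hp2, pvInB nums1.length nums2.length t.2 ∧ t = pvMk nums1 nums2 t.2 := by
    intro t ht
    rcases (hp2mem t).1 ht with h | ⟨hb, rfl⟩ | ⟨hb, rfl⟩
    · exact h2 t (List.mem_cons_of_mem _ h)
    · exact ⟨⟨(by omega : (0 : Int) ≤ i + 1), (hb1iff.1 hb).1, hj0, hjm⟩, rfl⟩
    · exact ⟨⟨hi0, hin, (by omega : (0 : Int) ≤ j + 1), (hb2iff.1 hb).1⟩, rfl⟩
  -- component 3: visited = heap cells ∪ popped
  have hc3 : ∀ c : Int × Int, (c ∈ v2 ∨ c = (0, 0)) ↔ (c ∈ hp2.map (·.2) ∨ c ∈ popped ++ [((i, j) : Int × Int)]) := by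
    intro c
    rw [hv2mem, hcells2, hpm]
    have hold := h3 c
    rw [hmapc] at hold
    constructor
    · rintro ((hv | ⟨hb, rfl⟩ | ⟨hb, rfl⟩) | h0)
      · rcases hold.1 (Or.inl hv) with h | h
        · rcases List.mem_cons.1 h with rfl | h'
          · exact Or.inr (Or.inr rfl)
          · exact Or.inl (Or.inl h')
        · exact Or.inr (Or.inl h)
      · exact Or.inl (Or.inr (Or.inl ⟨hb, rfl⟩))
      · exact Or.inl (Or.inr (Or.inr ⟨hb, rfl⟩))
      · rcases hold.1 (Or.inr h0) with h | h
        · rcases List.mem_cons.1 h with rfl | h'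
          · exact Or.inr (Or.inr rfl)
          · exact Or.inl (Or.inl h')
        · exact Or.inr (Or.inl h)
    · rintro ((h | ⟨hb, rfl⟩ | ⟨hb, rfl⟩) | hp)
      · rcases hold.2 (Or.inl (List.mem_cons_of_mem _ h)) with hv | h0
        · exact Or.inl (Or.inl hv)
        · exact Or.inr h0
      · exact Or.inl (Or.inr (Or.inl ⟨hb, rfl⟩))
      · exact Or.inl (Or.inr (Or.inr ⟨hb, rfl⟩))
      · rcases hp with hp | rfl
        · rcases hold.2 (Or.inr hp) with hv | h0
          · exact Or.inl (Or.inl hv)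
          · exact Or.inr h0
        · rcases hold.2 (Or.inl List.mem_cons_self) with hv | h0
          · exact Or.inl (Or.inl hv)
          · exact Or.inr h0
  -- component 4: visited = in-bounds successors of popped
  have hc4 : ∀ c : Int × Int, (c ∈ v2 ∨ c = (0, 0)) ↔
      (c = (0, 0) ∨ (pvInB nums1.length nums2.length c ∧
        ((c.1 - 1, c.2) ∈ popped ++ [((i, j) : Int × Int)] ∨ (c.1, c.2 - 1) ∈ popped ++ [((i, j) : Int × Int)]))) := by
    intro c
    have hpd1 : ((c.1 - 1, c.2) ∈ popped ++ [((i, j) : Int × Int)]) ↔ ((c.1 - 1, c.2) ∈ popped ∨ c = (i + 1, j)) := by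
      rw [hpm]
      have : ((c.1 - 1, c.2) : Int × Int) = (i, j) ↔ c = (i + 1, j) := by
        simp [Prod.ext_iff]; omega
      rw [this]
    have hpd2 : ((c.1, c.2 - 1) ∈ popped ++ [((i, j) : Int × Int)]) ↔ ((c.1, c.2 - 1) ∈ popped ∨ c = (i, j + 1)) := by
      rw [hpm]
      have : ((c.1, c.2 - 1) : Int × Int) = (i, j) ↔ c = (i, j + 1) := by
        simp [Prod.ext_iff]; omega
      rw [this]
    have hold := h4 c
    rw [hv2mem, hpd1, hpd2]
    by_cases hc1 : c = (i + 1, j)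
    · subst hc1
      have hinBiff : pvInB nums1.length nums2.length ((i + 1, j) : Int × Int) ↔ (i + 1 < (nums1.length : Int)) := by
        constructor
        · exact fun h => h.2.1
        · exact fun h => ⟨by omega, h, hj0, hjm⟩
      constructor
      · rintro ((hv | ⟨hb, _⟩ | ⟨hb, h⟩) | h)
        · exact Or.inr ⟨hvis_inB _ hv, Or.inl (Or.inr rfl)⟩
        · exact Or.inr ⟨hinBiff.2 (hb1iff.1 hb).1, Or.inl (Or.inr rfl)⟩
        · exact absurd h hne12
        · exact absurd h hno1
      · rintro (h | ⟨hB, _⟩)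
        · exact absurd h hno1
        · by_cases hv : ((i + 1, j) : Int × Int) ∈ visited
          · exact Or.inl (Or.inl hv)
          · have hb : b1 = true := hb1iff.2 ⟨hinBiff.1 hB, hv⟩
            exact Or.inl (Or.inr (Or.inl ⟨hb, rfl⟩))
    · by_cases hc2 : c = (i, j + 1)
      · subst hc2
        have hinBiff : pvInB nums1.length nums2.length ((i, j + 1) : Int × Int) ↔ (j + 1 < (nums2.length : Int)) := by
          constructor
          · exact fun h => h.2.2.2
          · exact fun h => ⟨hi0, hin, by omega, h⟩
        constructor
        · rintro ((hv | ⟨hb, h⟩ | ⟨hb, _⟩) | h)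
          · exact Or.inr ⟨hvis_inB _ hv, Or.inr (Or.inr rfl)⟩
          · exact absurd h.symm hne12
          · exact Or.inr ⟨hinBiff.2 (hb2iff.1 hb).1, Or.inr (Or.inr rfl)⟩
          · exact absurd h hno2
        · rintro (h | ⟨hB, _⟩)
          · exact absurd h hno2
          · by_cases hv : ((i, j + 1) : Int × Int) ∈ visited
            · exact Or.inl (Or.inl hv)
            · have hb : b2 = true := hb2iff.2 ⟨hinBiff.1 hB, hv⟩
              exact Or.inl (Or.inr (Or.inr ⟨hb, rfl⟩))
      · constructor
        · rintro ((hv | ⟨_, h⟩ | ⟨_, h⟩) | h)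
          · rcases hold.1 (Or.inl hv) with h | ⟨hB, hpd⟩
            · exact Or.inl h
            · refine Or.inr ⟨hB, ?_⟩
              rcases hpd with h' | h'
              · exact Or.inl (Or.inl h')
              · exact Or.inr (Or.inl h')
          · exact absurd h hc1
          · exact absurd h hc2
          · exact Or.inl h
        · rintro (h | ⟨hB, hpd⟩)
          · rcases hold.2 (Or.inl h) with h' | h'
            · exact Or.inl (Or.inl h')
            · exact Or.inr h'
          · have hpd' : ((c.1 - 1, c.2) ∈ popped ∨ (c.1, c.2 - 1) ∈ popped) := by
              rcases hpd with (h' | h') | (h' | h')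
              · exact Or.inl h'
              · exact absurd h' hc1
              · exact Or.inr h'
              · exact absurd h' hc2
            rcases hold.2 (Or.inr ⟨hB, hpd'⟩) with h' | h'
            · exact Or.inl (Or.inl h')
            · exact Or.inr h'
  -- component 5: heap cells are not popped
  have hc5 : ∀ t ∈ hp2, t.2 ∉ popped ++ [((i, j) : Int × Int)] := by
    intro t ht hmem
    rcases (hp2mem t).1 ht with h | ⟨hb, rfl⟩ | ⟨hb, rfl⟩
    · rcases (hpm t.2).1 hmem with h' | h'
      · exact h5 t (List.mem_cons_of_mem _ h) h'
      · exact hijr (h' ▸ List.mem_map.2 ⟨t, h, rfl⟩)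
    · rcases (hpm _).1 hmem with h' | h'
      · exact (hx1new hb).2 h'
      · exact hne1ij h'
    · rcases (hpm _).1 hmem with h' | h'
      · exact (hx2new hb).2 h'
      · exact hne2ij h'
  -- component 6: heap cells stay distinct
  have hc6 : (hp2.map (·.2)).Nodup := by
    have hnd1 : (hp1.map (·.2)).Nodup := by
      by_cases hb : b1 = true
      · simp only [hp1def, hb, if_pos]
        rw [(((pvHPush_perm _ _).map (·.2))).nodup_iff]
        exact List.nodup_cons.2 ⟨(hx1new hb).1, h6r⟩
      · simp [hp1def, hb, h6r]
    by_cases hb : b2 = true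
    · simp only [hp2def, hb, if_pos]
      rw [(((pvHPush_perm _ _).map (·.2))).nodup_iff]
      refine List.nodup_cons.2 ⟨?_, hnd1⟩
      intro h
      obtain ⟨t, ht, ht2⟩ := List.mem_map.1 h
      rcases (hp1mem t).1 ht with h' | ⟨_, rfl⟩
      · exact (hx2new hb).1 (List.mem_map.2 ⟨t, h', ht2⟩)
      · exact hne12 (by rw [hmk1snd] at ht2; exact ht2)
    · simp only [hp2def, hb, if_neg hb]
      exact hnd1
  -- component 7: popped cells are in bounds
  have hc7 : ∀ p ∈ popped ++ [((i, j) : Int × Int)], pvInB nums1.length nums2.length p := by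
    intro p hp
    rcases (hpm p).1 hp with h | rfl
    · exact h7 p h
    · exact ⟨hi0, hin, hj0, hjm⟩
  exact ⟨hpw2, hent, hc3, hc4, hc5, hc6, hc7⟩

-- the two loops agree from related states
lemma pvLoop_eq (nums1 nums2 : List Int) :
    ∀ (fuel : Nat) (out : List (List Int)) (heap : List (Int × Int × Int))
      (visited popped : List (Int × Int)),
      pvRel nums1 nums2 heap visited popped →
      pvLoopA nums1 nums2 nums1.length nums2.length fuel out heap visited =
      pvLoopB nums1 nums2 nums1.length nums2.length fuel out popped := by
  intro fuel
  induction fuel with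
  | zero => intro out heap visited popped _; rfl
  | succ fuel ih =>
    intro out heap visited popped hrel
    obtain ⟨h1, h2, h3, h4, h5, h6, h7⟩ := hrel
    cases heap with
    | nil =>
      -- empty heap: no candidate passes, so B's best is None and both loops raise
      have hbest : pvBestB nums1 nums2 nums1.length nums2.length popped = none := by
        rw [pvBestB_eq]
        rcases pvF_fold_none nums1 nums2 nums1.length nums2.length popped (pvCandsB popped) with
          ⟨h, _⟩ | ⟨t, _, ⟨c, hcm, hcp, _⟩, _⟩
        · exact h
        · exfalso
          have := (pvCand_iff_heapcell ⟨h1, h2, h3, h4, h5, h6, h7⟩ c).1 ⟨hcm, hcp⟩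
          simp at this
      simp [pvLoopA, pvLoopB, hbest]
    | cons hd rest =>
      obtain ⟨s, i, j⟩ := hd
      have hbest := pvBestB_head (hd := (s, i, j)) ⟨h1, h2, h3, h4, h5, h6, h7⟩
      simp only [pvLoopA, pvLoopB, hbest]
      exact ih _ _ _ _ (pvStepRel nums1 nums2 s i j rest visited popped _ _ _ _ _ _
        ⟨h1, h2, h3, h4, h5, h6, h7⟩ rfl rfl rfl rfl rfl rfl)

-- ===== VERDICT (by name: the statement is the Claim_ definition above) =====
theorem kSmallestPairsOptimized_spec : Claim_equal_kSmallestPairsOptimized := by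
  intro nums1 nums2 k _dom _pre
  unfold Spec_kSmallestPairsOptimized kSmallestPairsOptimized kSmallestPairsOptimized_alt
  cases nums1 with
  | nil => exact absurd rfl _pre.1
  | cons a t =>
    cases nums2 with
    | nil => exact absurd rfl _pre.2.1
    | cons b u =>
      have ha : PySem.List.pyGet? (a :: t) 0 = some a := by simp [pysem]
      have hb : PySem.List.pyGet? (b :: u) 0 = some b := by simp [pysem]
      simp only [ha, hb]
      have hpush : pvHPush ((a + b, 0, 0) : Int × Int × Int) [] = [(a + b, 0, 0)] := rfl
      rw [hpush]
      have relinit : pvRel (a :: t) (b :: u) [(a + b, 0, 0)] [] [] := by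
        refine ⟨by simp, ?_, ?_, ?_, by simp, by simp, by simp⟩
        · intro x hx
          rw [List.mem_singleton] at hx
          subst hx
          refine ⟨⟨le_refl 0, by simp, le_refl 0, by simp⟩, ?_⟩
          simp [pvMk, pysem]
        · intro c; simp
        · intro c
          constructor
          · rintro (h | rfl)
            · simp at h
            · exact Or.inl rfl
          · rintro (rfl | ⟨_, h | h⟩) <;> simp_all
      have heq := pvLoop_eq (a :: t) (b :: u) k.toNat [] [(a + b, 0, 0)] PySem.Set.empty [] relinit
      rw [heq]
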